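-- pv_equiv track=rewrite | github.com/MrBrantCode/unitest_baseline | mut_generate/mist_train_taco/taco_9589/solution.py | count_valid_pairs
-- ===== SOURCE A (Python) =====
-- def count_valid_pairs(s: str) -> int:
--     le = len(s)
--     m = [le] * (le + 1)
--     ans = 0
--
--     for i in range(le - 1, -1, -1):
--         m[i] = m[i + 1]
--         k = 1
--         while k * 2 + i < m[i]:
--             if s[i] == s[i + k] and s[i] == s[i + 2 * k]:
--                 m[i] = i + 2 * k
--             k += 1
--         ans += le - m[i]
--
--     return ans
-- ===== SOURCE B (Python) =====
-- def count_valid_pairs(s: str) -> int: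
--     # Forward two-pointer sweep: L = number of starts i such that s[i..r] still
--     # contains a monochromatic 3-term AP; each new r only scans midpoints whose
--     # mirrored start lies at or beyond L, and r contributes L bad substrings.
--     n = len(s)
--     ans = 0
--     L = 0
--     for r in range(n):
--         for b in range((r + L + 1) // 2, r):
--             a = 2 * b - r
--             if s[a] == s[b] == s[r] and a + 1 > L:
--                 L = a + 1
--         ans += L
--     return ans
-- ===== Notes on version B (the rewrite author's own statement) =====
-- stated objective: alternative
-- what changed: A scans right-to-left maintaining an array m[i] = smallest end of a monochromatic 3-term AP starting at or after i and sums len-m[i]; B scans left-to-right with a single left pointer L = number of starts whose substring ending at r already contains such an AP, scanning only midpoints whose mirrored start is at or beyond L, and sums L per right endpoint.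
import Mathlib
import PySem

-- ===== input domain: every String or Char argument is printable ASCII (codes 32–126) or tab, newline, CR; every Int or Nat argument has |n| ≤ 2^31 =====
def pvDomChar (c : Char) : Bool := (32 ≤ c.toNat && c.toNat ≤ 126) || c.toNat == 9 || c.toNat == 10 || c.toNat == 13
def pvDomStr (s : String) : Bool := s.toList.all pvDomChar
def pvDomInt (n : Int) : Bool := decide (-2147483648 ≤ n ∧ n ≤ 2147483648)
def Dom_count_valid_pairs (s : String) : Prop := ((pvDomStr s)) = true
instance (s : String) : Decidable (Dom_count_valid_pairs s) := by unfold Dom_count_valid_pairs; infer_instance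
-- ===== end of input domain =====

-- B replaces A's backward scan with minimal-bad-end array by a forward two-pointer sweep
-- (left pointer = number of bad substrings per right endpoint); alternative algorithm, same cost.

-- ===== PORT A =====
-- A's inner while loop: state is the list m and the counter k; m[i] only ever decreases.
def pvWhileA (s : String) (i : Int) (m : List Int) (k : Int) : List Int :=
  if k * 2 + i < PySem.List.pyGetD m i 0 then
    -- indices i, i+k, i+2*k are always in range here (i+2*k < m[i] ≤ len s), so
    -- comparing the Option results of pyGet? is exactly Python's char comparison
    let m' := if PySem.Str.pyGet? s i == PySem.Str.pyGet? s (i + k)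
                 && PySem.Str.pyGet? s i == PySem.Str.pyGet? s (i + 2 * k)
              then PySem.List.pySetD m i (i + 2 * k) else m
    pvWhileA s i m' (k + 1)
  else m
termination_by (PySem.List.pyGetD m i 0 - 2 * k - i).toNat
decreasing_by
  rcases (by
    unfold PySem.List.pySetD PySem.List.pySet? PySem.List.pyGetD PySem.List.pyGet?
    cases h : PySem.List.pyIdx? m.length i with
    | none => right; simp
    | some kk =>
        left
        have hk : kk < m.length := by
          unfold PySem.List.pyIdx? at h
          split_ifs at h <;> simp_all <;> omega
        simp [h, hk] :
    PySem.List.pyGetD (PySem.List.pySetD m i (i + 2*k)) i 0 = i + 2*k ∨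
      PySem.List.pySetD m i (i + 2*k) = m) with hset | hset <;>
    split_ifs <;> simp_all <;> omega

def count_valid_pairs (s : String) : Int :=
  let le := PySem.Str.len s
  let m : List Int := List.replicate (le + 1).toNat le
  let st := (PySem.List.pyRange (le - 1) (-1) (-1)).foldl
    (fun (st : List Int × Int) i =>
      let m1 := PySem.List.pySetD st.1 i (PySem.List.pyGetD st.1 (i + 1) 0)
      let m2 := pvWhileA s i m1 1
      (m2, st.2 + (le - PySem.List.pyGetD m2 i 0)))
    (m, 0)
  st.2

-- ===== PORT B =====
def count_valid_pairs_alt (s : String) : Int :=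
  let n := PySem.Str.len s
  let st := (PySem.List.pyRange 0 n 1).foldl
    (fun (st : Int × Int) r =>
      let L := (PySem.List.pyRange (PySem.Int.floordiv (r + st.2 + 1) 2) r 1).foldl
        (fun L b =>
          let a := 2 * b - r
          if (PySem.Str.pyGet? s a == PySem.Str.pyGet? s b
                && PySem.Str.pyGet? s b == PySem.Str.pyGet? s r)
             && a + 1 > L
          then a + 1 else L)
        st.2
      (st.1 + L, L))
    (0, 0)
  st.1

-- ===== PRECONDITION & SPEC =====
def Spec_count_valid_pairs (s : String) (out : Int) : Prop := out = count_valid_pairs_alt s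
instance (s : String) (out : Int) : Decidable (Spec_count_valid_pairs s out) := by unfold Spec_count_valid_pairs; infer_instance

-- ===== CLAIM (what is proved, stated in full; the proofs are below) =====
def Claim_equal_count_valid_pairs : Prop := ∀ (s : String), Dom_count_valid_pairs s → Spec_count_valid_pairs s (count_valid_pairs s)

-- ===== LEMMAS AND PROOFS =====

-- Nat-level reference for A's while loop
def pvRefW (l : List Char) (i k mi : Nat) : Nat :=
  if 2 * k + i < mi then
    pvRefW l i (k + 1)
      (if l.getD i 'a' = l.getD (i + k) 'a' ∧ l.getD i 'a' = l.getD (i + 2 * k) 'a'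
       then i + 2 * k else mi)
  else mi
termination_by mi - 2 * k - i
decreasing_by split_ifs <;> omega

-- Nat-level reference for A's m array: pvM l i = minimal end of a mono 3-AP in l[i:], else len
def pvM (l : List Char) (i : Nat) : Nat :=
  if i < l.length then pvRefW l i 1 (pvM l (i + 1)) else l.length
termination_by l.length - i

-- Nat-level reference for B's inner scan and left pointer
def pvGo (l : List Char) (r b L : Nat) : Nat :=
  if b < r then
    pvGo l r (b + 1)
      (if (l.getD (2 * b - r) 'a' = l.getD b 'a' ∧ l.getD b 'a' = l.getD r 'a')
          ∧ L < 2 * b - r + 1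
       then 2 * b - r + 1 else L)
  else L
termination_by r - b

def pvL (l : List Char) : Nat → Nat
  | 0 => 0
  | r + 1 => pvGo l r ((r + pvL l r + 1) / 2) (pvL l r)

-- a monochromatic 3-term AP at start a, step k
def pvAP (l : List Char) (a k : Nat) : Prop :=
  0 < k ∧ a + 2 * k < l.length ∧
    l.getD a 'a' = l.getD (a + k) 'a' ∧ l.getD a 'a' = l.getD (a + 2 * k) 'a'

-- the substring l[i..j] contains a monochromatic 3-term AP
def pvBad (l : List Char) (i j : Nat) : Prop :=
  ∃ a k, i ≤ a ∧ pvAP l a k ∧ a + 2 * k ≤ j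

theorem pvRefW_le (l : List Char) (i k mi : Nat) : pvRefW l i k mi ≤ mi := by
  fun_induction pvRefW with
  | case1 k mi hlt ih => split_ifs at ih ⊢ <;> omega
  | case2 => omega

theorem pvRefW_le_ap (l : List Char) (i k mi : Nat) (k' : Nat) (hk : k ≤ k')
    (h : l.getD i 'a' = l.getD (i + k') 'a' ∧ l.getD i 'a' = l.getD (i + 2 * k') 'a') :
    pvRefW l i k mi ≤ i + 2 * k' := by
  fun_induction pvRefW generalizing k' with
  | case1 k mi hlt ih =>
      rcases Nat.eq_or_lt_of_le hk with heq | hlt'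
      · subst heq
        rw [if_pos h]
        exact le_trans (pvRefW_le l i (k + 1) (i + 2 * k)) le_rfl
      · exact ih k' (by omega) h
  | case2 k mi hge => omega

theorem pvRefW_mem (l : List Char) (i k mi : Nat) :
    pvRefW l i k mi = mi ∨ ∃ k', k ≤ k' ∧
      (l.getD i 'a' = l.getD (i + k') 'a' ∧ l.getD i 'a' = l.getD (i + 2 * k') 'a') ∧
      pvRefW l i k mi = i + 2 * k' ∧ i + 2 * k' < mi := by
  fun_induction pvRefW with
  | case1 k mi hlt ih =>
      split_ifs at ih ⊢ with hc
      · rcases ih with h1 | ⟨k', h1, h2, h3, h4⟩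
        · right; exact ⟨k, le_rfl, hc, h1, by omega⟩
        · right; exact ⟨k', by omega, h2, h3, by omega⟩
      · rcases ih with h1 | ⟨k', h1, h2, h3, h4⟩
        · left; exact h1
        · right; exact ⟨k', by omega, h2, h3, h4⟩
  | case2 => left; rfl

theorem pvM_le (l : List Char) (i : Nat) : pvM l i ≤ l.length := by
  fun_induction pvM with
  | case1 i hlt ih => exact le_trans (pvRefW_le _ _ _ _) ih
  | case2 => omega

theorem pvM_succ_le (l : List Char) (i : Nat) : pvM l i ≤ pvM l (i + 1) := by
  rw [pvM]
  split_ifs with h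
  · exact pvRefW_le _ _ _ _
  · rw [pvM]; rw [if_neg (by omega)]

theorem pvM_mono (l : List Char) {i j : Nat} (h : i ≤ j) : pvM l i ≤ pvM l j := by
  induction j with
  | zero => have : i = 0 := by omega
            subst this; exact le_rfl
  | succ j ih =>
      rcases Nat.eq_or_lt_of_le h with heq | hlt
      · subst heq; exact le_rfl
      · exact le_trans (ih (by omega)) (pvM_succ_le l j)

theorem pvM_char (l : List Char) (i j : Nat) (hj : j < l.length) :
    pvM l i ≤ j ↔ pvBad l i j := by
  constructor
  · intro h
    induction hd : l.length - i using Nat.strong_induction_on generalizing i with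
    | _ d ih =>
        by_cases hi : i < l.length
        · rw [pvM, if_pos hi] at h
          rcases pvRefW_mem l i 1 (pvM l (i + 1)) with hm | ⟨k', hk1, he, heq, hlt⟩
          · rw [hm] at h
            obtain ⟨a, k, h1, h2, h3⟩ := ih (l.length - (i + 1)) (by omega) (i + 1) h rfl
            exact ⟨a, k, by omega, h2, h3⟩
          · refine ⟨i, k', le_rfl, ⟨by omega, ?_, he⟩, by omega⟩
            have := pvM_le l (i + 1)
            omega
        · rw [pvM, if_neg hi] at h
          omega
  · rintro ⟨a, k, hia, ⟨hk, hbound, he1, he2⟩, hend⟩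
    have h1 : pvM l i ≤ pvM l a := pvM_mono l hia
    have h2 : pvM l a ≤ a + 2 * k := by
      rw [pvM, if_pos (by omega)]
      exact pvRefW_le_ap l a 1 _ k hk ⟨he1, he2⟩
    omega

theorem pvGo_ge (l : List Char) (r b L : Nat) : L ≤ pvGo l r b L := by
  fun_induction pvGo with
  | case1 b L hlt ih => split_ifs at ih ⊢ <;> omega
  | case2 => omega

theorem pvGo_ge_ap (l : List Char) (r b L : Nat) (b' : Nat) (hb : b ≤ b') (hbr : b' < r)
    (h : l.getD (2 * b' - r) 'a' = l.getD b' 'a' ∧ l.getD b' 'a' = l.getD r 'a') :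
    2 * b' - r + 1 ≤ pvGo l r b L := by
  fun_induction pvGo generalizing b' with
  | case1 b L hlt ih =>
      rcases Nat.eq_or_lt_of_le hb with heq | hlt'
      · subst heq
        have h2 : (if (l.getD (2 * b - r) 'a' = l.getD b 'a' ∧ l.getD b 'a' = l.getD r 'a')
            ∧ L < 2 * b - r + 1 then 2 * b - r + 1 else L) ≥ 2 * b - r + 1 := by
          split_ifs with hc
          · omega
          · rw [not_and_or] at hc
            rcases hc with hc | hc
            · exact absurd h hc
            · omega
        exact le_trans h2 (pvGo_ge l r (b + 1) _)
      · exact ih b' (by omega) hbr h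
  | case2 b L hge => omega

theorem pvGo_mem (l : List Char) (r b L : Nat) (hrb : r ≤ 2 * b) :
    pvGo l r b L = L ∨ ∃ b', b ≤ b' ∧ b' < r ∧
      (l.getD (2 * b' - r) 'a' = l.getD b' 'a' ∧ l.getD b' 'a' = l.getD r 'a') ∧
      pvGo l r b L = 2 * b' - r + 1 := by
  fun_induction pvGo with
  | case1 b L hlt ih =>
      have hrb1 : r ≤ 2 * (b + 1) := by omega
      specialize ih hrb1
      split_ifs at ih ⊢ with hc
      · rcases ih with h1 | ⟨b', h1, h2, h3, h4⟩
        · right; exact ⟨b, le_rfl, hlt, hc.1, h1⟩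
        · right; exact ⟨b', by omega, h2, h3, h4⟩
      · rcases ih with h1 | ⟨b', h1, h2, h3, h4⟩
        · left; exact h1
        · right; exact ⟨b', by omega, h2, h3, h4⟩
  | case2 => left; rfl

theorem pvL_char (l : List Char) (r : Nat) (hr : r ≤ l.length) (i : Nat) :
    i < pvL l r ↔ ∃ a k, i ≤ a ∧ pvAP l a k ∧ a + 2 * k < r := by
  induction r generalizing i with
  | zero => simp [pvL]
  | succ r ih =>
      have hrn : r < l.length := by omega
      have ihr := ih (by omega)
      set L0 := pvL l r with hL0
      have hc2 : r ≤ 2 * ((r + L0 + 1) / 2) := by omega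
      constructor
      · intro h
        rw [pvL] at h
        rcases pvGo_mem l r ((r + L0 + 1) / 2) L0 hc2 with hm | ⟨b', hb1, hb2, he, heq⟩
        · rw [hm] at h
          obtain ⟨a, k, h1, h2, h3⟩ := (ihr i).mp h
          exact ⟨a, k, h1, h2, by omega⟩
        · rw [heq] at h
          have h2b : r ≤ 2 * b' := by omega
          refine ⟨2 * b' - r, r - b', by omega, ⟨by omega, by omega, ?_, ?_⟩, by omega⟩
          · have : 2 * b' - r + (r - b') = b' := by omega
            rw [this]; exact he.1
          · have : 2 * b' - r + 2 * (r - b') = r := by omega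
            rw [this]; exact he.1.trans he.2
      · rintro ⟨a, k, hia, hap, hend⟩
        by_cases hlast : a + 2 * k < r
        · have : i < L0 := (ihr i).mpr ⟨a, k, hia, hap, hlast⟩
          rw [pvL]
          exact lt_of_lt_of_le this (pvGo_ge _ _ _ _)
        · have hendr : a + 2 * k = r := by omega
          by_cases hL : a + 1 ≤ L0
          · rw [pvL]
            exact lt_of_lt_of_le (by omega) (pvGo_ge _ _ _ _)
          · obtain ⟨hk, hbound, he1, he2⟩ := hap
            have hb' : 2 * (a + k) - r = a := by omega
            have hgo := pvGo_ge_ap l r ((r + L0 + 1) / 2) L0 (a + k)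
              (by omega) (by omega)
              (by rw [hb']
                  refine ⟨he1, ?_⟩
                  have : a + 2 * k = r := hendr
                  rw [← this]
                  exact he1.symm.trans he2)
            rw [hb'] at hgo
            rw [pvL, ← hL0]
            omega

theorem pvL_le (l : List Char) (r : Nat) (hr : r ≤ l.length) : pvL l r ≤ l.length := by
  cases h : pvL l r with
  | zero => omega
  | succ m =>
      have : m < pvL l r := by omega
      obtain ⟨a, k, h1, ⟨hk, hb, _⟩, _⟩ := (pvL_char l r hr m).mp this
      omega

theorem pvKey (l : List Char) (i j : Nat) (hj : j < l.length) :
    pvM l i ≤ j ↔ i < pvL l (j + 1) := by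
  rw [pvM_char l i j hj, pvL_char l (j + 1) (by omega) i]
  constructor
  · rintro ⟨a, k, h1, h2, h3⟩; exact ⟨a, k, h1, h2, by omega⟩
  · rintro ⟨a, k, h1, h2, h3⟩; exact ⟨a, k, h1, h2, by omega⟩

theorem pvCnt1 (n m : Nat) (h : m ≤ n) :
    (∑ j ∈ Finset.range n, if m ≤ j then 1 else 0) = n - m := by
  rw [← Finset.card_filter]
  have : Finset.filter (fun j => m ≤ j) (Finset.range n) = Finset.Ico m n := by
    ext j
    simp [Finset.mem_filter, Finset.mem_range, Finset.mem_Ico]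
    omega
  rw [this, Nat.card_Ico]

theorem pvCnt2 (n K : Nat) (h : K ≤ n) :
    (∑ i ∈ Finset.range n, if i < K then 1 else 0) = K := by
  rw [← Finset.card_filter]
  have : Finset.filter (fun i => i < K) (Finset.range n) = Finset.range K := by
    ext i
    simp [Finset.mem_filter, Finset.mem_range]
    omega
  rw [this, Finset.card_range]

-- double counting: both programs count the pairs (i, j) with pvBad l i j
theorem pvTotals (l : List Char) :
    (∑ i ∈ Finset.range l.length, (l.length - pvM l i))
      = ∑ r ∈ Finset.range l.length, pvL l (r + 1) := by
  calc (∑ i ∈ Finset.range l.length, (l.length - pvM l i))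
      = ∑ i ∈ Finset.range l.length, ∑ j ∈ Finset.range l.length,
          (if pvM l i ≤ j then 1 else 0) := by
        apply Finset.sum_congr rfl
        intro i _
        rw [pvCnt1 l.length (pvM l i) (pvM_le l i)]
    _ = ∑ j ∈ Finset.range l.length, ∑ i ∈ Finset.range l.length,
          (if pvM l i ≤ j then 1 else 0) := Finset.sum_comm
    _ = ∑ j ∈ Finset.range l.length, ∑ i ∈ Finset.range l.length,
          (if i < pvL l (j + 1) then 1 else 0) := by
        apply Finset.sum_congr rfl
        intro j hj
        rw [Finset.mem_range] at hj
        apply Finset.sum_congr rfl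
        intro i _
        congr 1
        rw [eq_iff_iff]
        exact pvKey l i j hj
    _ = ∑ r ∈ Finset.range l.length, pvL l (r + 1) := by
        apply Finset.sum_congr rfl
        intro j hj
        rw [Finset.mem_range] at hj
        exact pvCnt2 l.length (pvL l (j + 1)) (pvL_le l (j + 1) (by omega))

-- ===== port bridges: the Int/PySem ports compute the Nat-level references =====

theorem pvCmp (l : List Char) {x y : Nat} (hx : x < l.length) (hy : y < l.length) :
    (l[x]? == l[y]?) = decide (l.getD x 'a' = l.getD y 'a') := by
  rw [List.getElem?_eq_getElem hx, List.getElem?_eq_getElem hy,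
      List.getD_eq_getElem l 'a' hx, List.getD_eq_getElem l 'a' hy]
  rw [Bool.eq_iff_iff]
  simp

theorem pvBridgeW (s : String) (i k mi : Nat) (m : List Int)
    (hlen : m.length = s.toList.length + 1) (hi : i < s.toList.length)
    (hget : PySem.List.pyGetD m (i : Int) 0 = (mi : Int)) (hmi : mi ≤ s.toList.length) :
    pvWhileA s (i : Int) m (k : Int) = PySem.List.pySetD m (i : Int) ((pvRefW s.toList i k mi : Nat) : Int) := by
  induction hd : mi - 2 * k - i using Nat.strong_induction_on generalizing m k mi with
  | _ d ih =>
  rw [pvWhileA, pvRefW, hget]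
  by_cases hcond : 2 * k + i < mi
  · rw [if_pos (by omega), if_pos hcond]
    have hik : (i : Int) + (k : Int) = ((i + k : Nat) : Int) := by push_cast; ring
    have hik2 : (i : Int) + 2 * (k : Int) = ((i + 2 * k : Nat) : Int) := by push_cast; ring
    have hx : i < s.toList.length := hi
    have hy : i + k < s.toList.length := by omega
    have hz : i + 2 * k < s.toList.length := by omega
    rw [hik, hik2, PySem.Str.pyGet?_natCast, PySem.Str.pyGet?_natCast, PySem.Str.pyGet?_natCast,
        pvCmp s.toList hx hy, pvCmp s.toList hx hz]
    by_cases hc : s.toList.getD i 'a' = s.toList.getD (i + k) 'a' ∧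
        s.toList.getD i 'a' = s.toList.getD (i + 2 * k) 'a'
    · have hbool : (decide (s.toList.getD i 'a' = s.toList.getD (i+k) 'a') &&
              decide (s.toList.getD i 'a' = s.toList.getD (i+2*k) 'a')) = true := by
        rw [decide_eq_true hc.1, decide_eq_true hc.2]; rfl
      rw [if_pos hbool, if_pos hc]
      show pvWhileA s (i:Int) (PySem.List.pySetD m (i:Int) ((i:Int) + 2*(k:Int))) ((k:Int)+1)
        = PySem.List.pySetD m (i:Int) ((pvRefW s.toList i (k+1) (i+2*k) : Nat) : Int)
      rw [hik2]
      have hilen : i < m.length := by omega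
      have hget' : PySem.List.pyGetD (PySem.List.pySetD m (i:Int) ((i + 2*k : Nat) : Int)) (i:Int) 0
          = ((i + 2*k : Nat) : Int) := by
        rw [PySem.List.pyGetD_pySetD_natCast m i i _ 0 hilen, if_pos rfl]
      have hlen' : (PySem.List.pySetD m (i:Int) ((i + 2*k : Nat) : Int)).length = s.toList.length + 1 := by
        rw [PySem.List.pySetD_natCast]; simp [hlen]
      have hrec := ih ((i+2*k) - 2*(k+1) - i) (by omega) (k+1) (i+2*k)
        (PySem.List.pySetD m (i:Int) ((i + 2*k : Nat) : Int)) hlen' hget' (by omega) rfl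
      push_cast at hrec ⊢
      rw [hrec]
      rw [PySem.List.pySetD_natCast, PySem.List.pySetD_natCast, PySem.List.pySetD_natCast,
          List.set_set]
    · have hbool : (decide (s.toList.getD i 'a' = s.toList.getD (i+k) 'a') &&
              decide (s.toList.getD i 'a' = s.toList.getD (i+2*k) 'a')) = false := by
        rw [Bool.and_eq_false_iff]
        rcases (not_and_or.mp hc) with h | h
        · left; simpa using h
        · right; simpa using h
      have hnb : ¬((decide (s.toList.getD i 'a' = s.toList.getD (i+k) 'a') &&
              decide (s.toList.getD i 'a' = s.toList.getD (i+2*k) 'a')) = true) := by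
        rw [hbool]; simp
      rw [if_neg hnb, if_neg hc]
      show pvWhileA s (i:Int) m ((k:Int)+1)
        = PySem.List.pySetD m (i:Int) ((pvRefW s.toList i (k+1) mi : Nat) : Int)
      have hrec := ih (mi - 2*(k+1) - i) (by omega) (k+1) mi m hlen hget hmi rfl
      push_cast at hrec ⊢
      exact hrec
  · rw [if_neg (by omega), if_neg hcond]
    have hilen : i < m.length := by omega
    rw [PySem.List.pySetD_natCast]
    have hgv : m[i] = (mi : Int) := by
      have := hget
      rw [show ((i:Nat):Int) = (i:Int) from rfl] at this
      rw [PySem.List.pyGetD_of_nonneg m 0 (by positivity)] at this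
      rw [← this, Int.toNat_natCast, List.getD_eq_getElem m 0 hilen]
    rw [← hgv, List.set_getElem_self hilen]

-- the m list after A's outer loop has processed indices ≥ t
def pvMList (l : List Char) (t : Nat) : List Int :=
  (List.range (l.length + 1)).map (fun j => if t ≤ j then ((pvM l j : Nat) : Int) else (l.length : Int))

theorem pvMList_len (l : List Char) (t : Nat) : (pvMList l t).length = l.length + 1 := by
  simp [pvMList]

theorem pvMList_get (l : List Char) (t j : Nat) (hj : j < l.length + 1) :
    PySem.List.pyGetD (pvMList l t) (j : Int) 0
      = if t ≤ j then ((pvM l j : Nat) : Int) else (l.length : Int) := by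
  rw [PySem.List.pyGetD_natCast]
  rw [List.getD_eq_getElem _ _ (by simp [pvMList]; omega)]
  simp [pvMList]

theorem pvMList_set (l : List Char) (t : Nat) (ht : t < l.length) :
    (pvMList l (t + 1)).set t ((pvM l t : Nat) : Int) = pvMList l t := by
  apply List.ext_getElem
  · simp [pvMList]
  · intro j hj1 hj2
    have hjn : j < l.length + 1 := by simpa [pvMList] using hj2
    rw [List.getElem_set]
    simp only [pvMList, List.getElem_map, List.getElem_range]
    split_ifs with h1 h2 h3 h4 h5 <;> first
      | rfl
      | (subst h1; rfl)
      | omega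

theorem pvAFold (s : String) (t : Nat) (ht : t ≤ s.toList.length) : ∀ acc : Int,
    (PySem.List.pyRange ((t : Int) - 1) (-1) (-1)).foldl
      (fun (st : List Int × Int) i =>
        let m1 := PySem.List.pySetD st.1 i (PySem.List.pyGetD st.1 (i + 1) 0)
        let m2 := pvWhileA s i m1 1
        (m2, st.2 + (PySem.Str.len s - PySem.List.pyGetD m2 i 0)))
      (pvMList s.toList t, acc)
    = (pvMList s.toList 0,
       acc + ((∑ i ∈ Finset.range t, (s.toList.length - pvM s.toList i) : Nat) : Int)) := by
  induction t with
  | zero =>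
      intro acc
      rw [show ((0:Nat):Int) - 1 = -1 by norm_num,
          PySem.List.pyRange_neg_one_eq_nil (by norm_num)]
      simp
  | succ t ih =>
      intro acc
      have hns : ((t+1 : Nat) : Int) - 1 = (t : Int) := by push_cast; ring
      rw [hns, PySem.List.pyRange_neg_one_cons (by omega)]
      rw [List.foldl_cons]
      have hget1 : PySem.List.pyGetD (pvMList s.toList (t+1)) ((t:Int) + 1) 0
          = ((pvM s.toList (t+1) : Nat) : Int) := by
        rw [show (t:Int) + 1 = ((t+1 : Nat) : Int) by push_cast; ring]
        rw [pvMList_get s.toList (t+1) (t+1) (by omega), if_pos le_rfl]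
      have hm1get : PySem.List.pyGetD
          (PySem.List.pySetD (pvMList s.toList (t+1)) (t:Int) ((pvM s.toList (t+1) : Nat) : Int))
          ((t:Int)) 0 = ((pvM s.toList (t+1) : Nat) : Int) := by
        rw [PySem.List.pyGetD_pySetD_natCast _ t t _ 0 (by rw [pvMList_len]; omega), if_pos rfl]
      have hm1len : (PySem.List.pySetD (pvMList s.toList (t+1)) (t:Int)
          ((pvM s.toList (t+1) : Nat) : Int)).length = s.toList.length + 1 := by
        rw [PySem.List.pySetD_natCast]
        simp [pvMList]
      have hw := pvBridgeW s t 1 (pvM s.toList (t+1))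
        (PySem.List.pySetD (pvMList s.toList (t+1)) (t:Int) ((pvM s.toList (t+1) : Nat) : Int))
        hm1len (by omega) hm1get (pvM_le s.toList (t+1))
      have hrefw : pvRefW s.toList t 1 (pvM s.toList (t+1)) = pvM s.toList t := by
        conv_rhs => rw [pvM]
        rw [if_pos (by omega)]
      rw [hrefw] at hw
      have hm2 : pvWhileA s (t:Int)
          (PySem.List.pySetD (pvMList s.toList (t+1)) (t:Int) ((pvM s.toList (t+1) : Nat) : Int)) 1
          = pvMList s.toList t := by
        rw [show (1:Int) = ((1:Nat):Int) by norm_num, hw]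
        rw [PySem.List.pySetD_natCast, PySem.List.pySetD_natCast, List.set_set]
        exact pvMList_set s.toList t (by omega)
      simp only [hget1, hm2]
      have hgett : PySem.List.pyGetD (pvMList s.toList t) (t:Int) 0
          = ((pvM s.toList t : Nat) : Int) := by
        rw [pvMList_get s.toList t t (by omega), if_pos le_rfl]
      rw [hgett, ih (by omega)]
      congr 1
      have hle := pvM_le s.toList t
      rw [Finset.sum_range_succ, PySem.Str.len_eq]
      push_cast [Nat.cast_sub hle]
      ring

theorem pvReplicate (l : List Char) :
    List.replicate (l.length + 1) ((l.length : Nat) : Int) = pvMList l l.length := by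
  apply List.ext_getElem
  · simp [pvMList]
  · intro j hj1 hj2
    have hjn : j < l.length + 1 := by simpa using hj1
    simp only [List.getElem_replicate, pvMList, List.getElem_map, List.getElem_range]
    split_ifs with h
    · have hj : j = l.length := by omega
      subst hj
      rw [pvM, if_neg (by omega)]
    · rfl

theorem pvPortA (s : String) :
    count_valid_pairs s
      = ((∑ i ∈ Finset.range s.toList.length, (s.toList.length - pvM s.toList i) : Nat) : Int) := by
  unfold count_valid_pairs
  simp only [PySem.Str.len_eq]
  have h1 : ((s.toList.length : Int) + 1).toNat = s.toList.length + 1 := by omega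
  rw [h1, pvReplicate]
  have := pvAFold s s.toList.length le_rfl 0
  rw [PySem.Str.len_eq] at this
  rw [this]
  ring

-- B's inner-loop body, named so that head rewrites do not disturb the folded function
def pvStepB (s : String) (r : Int) (L' : Int) (bb : Int) : Int :=
  let a := 2 * bb - r
  if (PySem.Str.pyGet? s a == PySem.Str.pyGet? s bb
        && PySem.Str.pyGet? s bb == PySem.Str.pyGet? s r)
     && a + 1 > L'
  then a + 1 else L'

theorem pvBridgeGo (s : String) (r : Nat) (hr : r < s.toList.length) (b L : Nat)
    (hrb : r ≤ 2 * b) :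
    (PySem.List.pyRange (b : Int) (r : Int) 1).foldl (pvStepB s (r : Int)) ((L : Nat) : Int)
    = ((pvGo s.toList r b L : Nat) : Int) := by
  induction hd : r - b using Nat.strong_induction_on generalizing b L with
  | _ d ih =>
  by_cases hbr : b < r
  · rw [PySem.List.pyRange_one_cons (by omega), List.foldl_cons]
    have ha : 2 * (b : Int) - (r : Int) = ((2 * b - r : Nat) : Int) := by push_cast; omega
    have hx : 2 * b - r < s.toList.length := by omega
    have hy : b < s.toList.length := by omega
    have hz : r < s.toList.length := hr
    by_cases hc : (s.toList.getD (2 * b - r) 'a' = s.toList.getD b 'a' ∧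
        s.toList.getD b 'a' = s.toList.getD r 'a') ∧ L < 2 * b - r + 1
    · have hstep : pvStepB s (r : Int) ((L : Nat) : Int) ((b : Nat) : Int)
          = ((2 * b - r + 1 : Nat) : Int) := by
        unfold pvStepB
        simp only [ha]
        rw [PySem.Str.pyGet?_natCast, PySem.Str.pyGet?_natCast, PySem.Str.pyGet?_natCast,
            pvCmp s.toList hx hy, pvCmp s.toList hy hz]
        rw [if_pos (by
          rw [decide_eq_true hc.1.1, decide_eq_true hc.1.2]
          simp only [Bool.and_self, Bool.true_and, gt_iff_lt, decide_eq_true_eq]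
          push_cast; omega)]
        push_cast; omega
      rw [hstep, show ((b:Int)+1) = ((b+1 : Nat):Int) by push_cast; ring]
      rw [ih (r - (b+1)) (by omega) (b+1) (2*b-r+1) (by omega) rfl]
      conv_rhs => rw [pvGo]
      rw [if_pos hbr, if_pos hc]
    · have hstep : pvStepB s (r : Int) ((L : Nat) : Int) ((b : Nat) : Int)
          = ((L : Nat) : Int) := by
        unfold pvStepB
        simp only [ha]
        rw [PySem.Str.pyGet?_natCast, PySem.Str.pyGet?_natCast, PySem.Str.pyGet?_natCast,
            pvCmp s.toList hx hy, pvCmp s.toList hy hz]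
        rw [if_neg (by
          intro hcon
          apply hc
          rw [Bool.and_eq_true, Bool.and_eq_true] at hcon
          obtain ⟨⟨h1, h2⟩, h3⟩ := hcon
          refine ⟨⟨of_decide_eq_true h1, of_decide_eq_true h2⟩, ?_⟩
          simp only [gt_iff_lt, decide_eq_true_eq] at h3
          omega)]
      rw [hstep, show ((b:Int)+1) = ((b+1 : Nat):Int) by push_cast; ring]
      rw [ih (r - (b+1)) (by omega) (b+1) L (by omega) rfl]
      conv_rhs => rw [pvGo]
      rw [if_pos hbr, if_neg hc]
  · rw [PySem.List.pyRange_one_eq_nil (by omega), List.foldl_nil, pvGo, if_neg hbr]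

def pvOuterB (s : String) (st : Int × Int) (r : Int) : Int × Int :=
  let L := (PySem.List.pyRange (PySem.Int.floordiv (r + st.2 + 1) 2) r 1).foldl
    (pvStepB s r) st.2
  (st.1 + L, L)

theorem pvBFold (s : String) (t : Nat) (ht : t ≤ s.toList.length) :
    (PySem.List.pyRange 0 (t : Int) 1).foldl (pvOuterB s) (0, 0)
      = (((∑ r ∈ Finset.range t, pvL s.toList (r + 1) : Nat) : Int),
         ((pvL s.toList t : Nat) : Int)) := by
  induction t with
  | zero =>
      rw [show ((0:Nat):Int) = 0 by norm_num, PySem.List.pyRange_one_eq_nil le_rfl]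
      simp [pvL]
  | succ t ih =>
      rw [show ((t+1:Nat):Int) = (t:Int) + 1 by push_cast; ring,
          PySem.List.pyRange_one_succ_right (by positivity), List.foldl_append,
          ih (by omega), List.foldl_cons, List.foldl_nil]
      unfold pvOuterB
      have hcut : PySem.Int.floordiv ((t:Int) + ((pvL s.toList t : Nat) : Int) + 1) 2
          = (((t + pvL s.toList t + 1) / 2 : Nat) : Int) := by
        rw [show (t:Int) + ((pvL s.toList t : Nat) : Int) + 1 = ((t + pvL s.toList t + 1 : Nat) : Int) by push_cast; ring]
        exact_mod_cast PySem.Int.floordiv_natCast (t + pvL s.toList t + 1) 2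
      simp only [hcut]
      rw [pvBridgeGo s t (by omega) ((t + pvL s.toList t + 1) / 2) (pvL s.toList t) (by omega)]
      have hL1 : pvGo s.toList t ((t + pvL s.toList t + 1) / 2) (pvL s.toList t)
          = pvL s.toList (t+1) := by rw [pvL]
      rw [hL1]
      refine Prod.ext ?_ rfl
      show ((∑ r ∈ Finset.range t, pvL s.toList (r + 1) : Nat) : Int)
      + ((pvL s.toList (t+1) : Nat) : Int) = _
      rw [Finset.sum_range_succ]
      push_cast
      ring

theorem pvPortB (s : String) :
    count_valid_pairs_alt s
      = ((∑ r ∈ Finset.range s.toList.length, pvL s.toList (r + 1) : Nat) : Int) := by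
  show ((PySem.List.pyRange 0 (PySem.Str.len s) 1).foldl (pvOuterB s) (0, 0)).1 = _
  rw [PySem.Str.len_eq, pvBFold s s.toList.length le_rfl]

-- ===== VERDICT (by name: the statement is the Claim_ definition above) =====
theorem count_valid_pairs_spec : Claim_equal_count_valid_pairs := by
  intro s _
  unfold Spec_count_valid_pairs
  rw [pvPortA, pvPortB, pvTotals]
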